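-- pv_equiv track=rewrite | github.com/XUNZI1314/ML | pdb_parser.py | extract_ter_blocks_from_pdb_text
-- ===== SOURCE A (Python) =====
-- from typing import Any, Iterable, Iterator
--
-- def _record_name(line: str) -> str:
--     """Return uppercase PDB record name from one line."""
--     return line[:6].strip().upper()
--
-- def _safe_int(text: Any, default: int = -1) -> int:
--     """Convert text to int with a fallback value."""
--     try:
--         return int(str(text).strip())
--     except Exception:
--         return int(default)
--
-- def _parse_pdb_atom_metadata(line: str) -> dict[str, Any]:
--     """Parse the key metadata fields from a PDB ATOM/HETATM line."""
--     record = _record_name(line)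
--     if record not in {"ATOM", "HETATM"}:
--         raise ValueError(f"Unsupported PDB record type: {record!r}")
--
--     base = line.rstrip("\r\n")
--     serial = _safe_int(base[6:11], default=-1)
--     atom_name = base[12:16].strip()
--     altloc = base[16:17].strip()
--     resname = base[17:20].strip() or "UNK"
--     chain_id = base[21:22].strip()
--     resseq = _safe_int(base[22:26], default=-1)
--     icode = base[26:27].strip()
--     return {
--         "record": record,
--         "serial": serial,
--         "atom_name": atom_name,
--         "altloc": altloc,
--         "resname": resname,
--         "chain_id": chain_id,
--         "resseq": resseq,
--         "icode": icode,
--         "is_hetatm": record == "HETATM",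
--     }
--
-- def extract_ter_blocks_from_pdb_text(pdb_text: Iterable[str] | str) -> list[list[str]]:
--     """Split normalized PDB text into blocks using TER records and residue resets.
--
--     This helper is intentionally conservative:
--     - It respects explicit TER records.
--     - If chain IDs are blank, a decreasing residue number is treated as a block boundary.
--     - Non-coordinate records are ignored.
--     """
--     if isinstance(pdb_text, str):
--         lines = pdb_text.splitlines()
--     else:
--         lines = list(pdb_text)
--
--     blocks: list[list[str]] = []
--     current_block: list[str] = []
--     last_blank_chain_resseq: int | None = None
--     saw_ter = False
--
--     for raw_line in lines:
--         record = _record_name(raw_line)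
--         if record == "TER":
--             saw_ter = True
--             if current_block:
--                 blocks.append(current_block)
--                 current_block = []
--             last_blank_chain_resseq = None
--             continue
--
--         if record not in {"ATOM", "HETATM"}:
--             continue
--
--         meta = _parse_pdb_atom_metadata(raw_line)
--         if not meta["chain_id"] and current_block:
--             if last_blank_chain_resseq is not None and meta["resseq"] < last_blank_chain_resseq:
--                 blocks.append(current_block)
--                 current_block = []
--                 last_blank_chain_resseq = None
--
--         current_block.append(raw_line.rstrip("\r\n"))
--         if not meta["chain_id"]:
--             last_blank_chain_resseq = meta["resseq"]
--
--     if current_block: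
--         blocks.append(current_block)
--
--     # Return a single block when no coordinate records were found.
--     if not blocks and saw_ter:
--         return []
--     return blocks
-- ===== SOURCE B (Python) =====
-- from typing import Any, Iterable
--
--
-- def _record_name(line: str) -> str:
--     """Return uppercase PDB record name from one line."""
--     return line[:6].strip().upper()
--
--
-- def _safe_int(text: Any, default: int = -1) -> int:
--     """Convert text to int with a fallback value."""
--     try:
--         return int(str(text).strip())
--     except Exception:
--         return int(default)
--
--
-- def _take_block(lines):
--     """Consume lines until one block is complete; return (block, remaining_lines).
--
--     A TER ends the block (consumed); a blank-chain coordinate line whose residue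
--     number drops below the last blank-chain one ends the block WITHOUT being
--     consumed (it starts the next block); other records are skipped."""
--     block = []
--     last_blank_resseq = None
--     i = 0
--     while i < len(lines):
--         line = lines[i]
--         record = _record_name(line)
--         if record == "TER":
--             i += 1
--             if block:
--                 return block, lines[i:]
--             last_blank_resseq = None
--             continue
--         if record not in ("ATOM", "HETATM"):
--             i += 1
--             continue
--         base = line.rstrip("\r\n")
--         blank = not base[21:22].strip()
--         resseq = _safe_int(base[22:26])
--         if blank and block and last_blank_resseq is not None and resseq < last_blank_resseq:
--             return block, lines[i:]
--         block.append(base)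
--         if blank:
--             last_blank_resseq = resseq
--         i += 1
--     return block, []
--
--
-- def extract_ter_blocks_from_pdb_text(pdb_text: "Iterable[str] | str") -> list[list[str]]:
--     """Chunking variant: repeatedly carve the next whole block off the front of
--     the line list, instead of folding all lines through one shared state."""
--     lines = pdb_text.splitlines() if isinstance(pdb_text, str) else list(pdb_text)
--     blocks = []
--     while lines:
--         block, lines = _take_block(lines)
--         if block:
--             blocks.append(block)
--     return blocks
-- ===== Notes on version B (the rewrite author's own statement) =====
-- stated objective: alternative
-- what changed: A folds every line through one shared mutable state (blocks, current_block, last_blank_chain_resseq, dead saw_ter flag) in a single loop; B instead repeatedly carves one complete block off the front of the line list with a helper _take_block that returns (block, remaining_lines) and leaves a forced-split line unconsumed, so the outer loop holds no per-line state and the dead saw_ter branch disappears.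
import Mathlib
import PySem

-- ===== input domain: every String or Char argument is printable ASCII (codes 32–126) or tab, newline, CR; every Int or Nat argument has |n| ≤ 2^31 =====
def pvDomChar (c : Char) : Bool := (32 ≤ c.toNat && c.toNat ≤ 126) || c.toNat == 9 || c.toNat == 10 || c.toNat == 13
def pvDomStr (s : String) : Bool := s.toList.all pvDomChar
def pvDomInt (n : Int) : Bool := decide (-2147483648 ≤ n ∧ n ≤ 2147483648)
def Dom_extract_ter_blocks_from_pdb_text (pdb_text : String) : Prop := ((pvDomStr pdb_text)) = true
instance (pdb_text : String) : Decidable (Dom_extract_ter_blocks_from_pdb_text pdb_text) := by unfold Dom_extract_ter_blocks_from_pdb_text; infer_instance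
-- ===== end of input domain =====

-- B replaces A's single stateful fold over all lines by a chunking loop that repeatedly carves one
-- whole block off the front of the line list (objective: alternative decomposition, same cost).

-- ===== PORT A =====
-- Python helper _record_name: line[:6].strip().upper()
def pvRecordName (line : List Char) : List Char :=
  PySem.Chars.upper (PySem.Chars.strip (PySem.List.slice line none (some 6)))

-- Python str.rstrip("\r\n") — hand port (exact: drops trailing '\r'/'\n' characters)
def pvRstripCRLF (cs : List Char) : List Char :=
  (cs.reverse.dropWhile (fun c => c == '\r' || c == '\n')).reverse

-- Python helper _safe_int(text, default=-1): int(str(text).strip()) with fallback (str() is identity here)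
def pvSafeInt (cs : List Char) : Int :=
  (PySem.Int.ofChars? (PySem.Chars.strip cs)).getD (-1)

structure PdbMeta where
  record : List Char
  serial : Int
  atom_name : List Char
  altloc : List Char
  resname : List Char
  chain_id : List Char
  resseq : Int
  icode : List Char
  is_hetatm : Bool

-- Python helper _parse_pdb_atom_metadata; its ValueError branch is unreachable at the only call
-- site (the caller has already checked record ∈ {ATOM, HETATM}), so the port returns the fields directly.
def pvParseMeta (line : List Char) : PdbMeta :=
  let record := pvRecordName line
  let base := pvRstripCRLF line
  { record := record
    serial := pvSafeInt (PySem.List.slice base (some 6) (some 11))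
    atom_name := PySem.Chars.strip (PySem.List.slice base (some 12) (some 16))
    altloc := PySem.Chars.strip (PySem.List.slice base (some 16) (some 17))
    resname :=
      let r := PySem.Chars.strip (PySem.List.slice base (some 17) (some 20))
      if r = [] then "UNK".toList else r
    chain_id := PySem.Chars.strip (PySem.List.slice base (some 21) (some 22))
    resseq := pvSafeInt (PySem.List.slice base (some 22) (some 26))
    icode := PySem.Chars.strip (PySem.List.slice base (some 26) (some 27))
    is_hetatm := decide (record = "HETATM".toList) }

-- A's "blank chain id & decreasing resseq ⇒ close block" update (the two nested ifs of the loop body)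
def pvAtomUpdate (blocks : List (List String)) (cur : List String) (last : Option Int)
    (chain : List Char) (resseq : Int) : List (List String) × List String × Option Int :=
  if chain = [] ∧ cur ≠ [] then
    match last with
    | some lv =>
      if resseq < lv then (blocks ++ [cur], ([] : List String), (none : Option Int))
      else (blocks, cur, last)
    | none => (blocks, cur, last)
  else (blocks, cur, last)

-- one iteration of A's loop; state: (blocks, current_block, last_blank_chain_resseq, saw_ter)
def pvStepA (st : List (List String) × List String × Option Int × Bool) (raw : String) :
    List (List String) × List String × Option Int × Bool :=
  match st with
  | (blocks, cur, last, sawTer) =>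
    if pvRecordName raw.toList = "TER".toList then
      if cur ≠ [] then (blocks ++ [cur], [], none, true) else (blocks, cur, none, true)
    else if pvRecordName raw.toList = "ATOM".toList ∨ pvRecordName raw.toList = "HETATM".toList then
      let m := pvParseMeta raw.toList
      let s2 := pvAtomUpdate blocks cur last m.chain_id m.resseq
      (s2.1, s2.2.1 ++ [String.ofList (pvRstripCRLF raw.toList)],
        (if m.chain_id = [] then some m.resseq else s2.2.2), sawTer)
    else (blocks, cur, last, sawTer)

def extract_ter_blocks_from_pdb_text (pdb_text : String) : List (List String) :=
  let lines := PySem.Str.splitlines pdb_text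
  let st := lines.foldl pvStepA ([], [], none, false)
  let blocks := if st.2.1 ≠ [] then st.1 ++ [st.2.1] else st.1
  if blocks = [] ∧ st.2.2.2 = true then [] else blocks

-- ===== PORT B =====
-- B-side copies of the module helpers Source B reuses
def pvRecordNameB (line : List Char) : List Char :=
  PySem.Chars.upper (PySem.Chars.strip (PySem.List.slice line none (some 6)))

def pvRstripCRLFB (cs : List Char) : List Char :=
  (cs.reverse.dropWhile (fun c => c == '\r' || c == '\n')).reverse

def pvSafeIntB (cs : List Char) : Int :=
  (PySem.Int.ofChars? (PySem.Chars.strip cs)).getD (-1)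

-- Source B's _take_block: consume lines until one block is complete, return (block, remaining lines);
-- a forced split returns its line unconsumed. The Python index loop over lines[i:] becomes
-- structural recursion on the list of lines.
def pvTakeBlock : List String → List String → Option Int → List String × List String
  | [], block, _ => (block, [])
  | line :: rest, block, last =>
    let r := pvRecordNameB line.toList
    if r = "TER".toList then
      if block ≠ [] then (block, rest) else pvTakeBlock rest block none
    else if r = "ATOM".toList ∨ r = "HETATM".toList then
      let base := pvRstripCRLFB line.toList
      let blank : Bool := decide (PySem.Chars.strip (PySem.List.slice base (some 21) (some 22)) = ([] : List Char))
      let resseq := pvSafeIntB (PySem.List.slice base (some 22) (some 26))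
      if blank && !block.isEmpty &&
          (match last with | some lv => decide (resseq < lv) | none => false) then
        (block, line :: rest)
      else
        pvTakeBlock rest (block ++ [String.ofList base]) (if blank then some resseq else last)
    else pvTakeBlock rest block last

-- _take_block never hands back more lines than it was given (needed for termination of Source B's outer loop)
theorem pvTakeBlock_rest_le (lines : List String) (block : List String) (last : Option Int) :
    (pvTakeBlock lines block last).2.length ≤ lines.length := by
  induction lines generalizing block last with
  | nil => simp [pvTakeBlock]
  | cons line rest ih =>
    simp only [pvTakeBlock]
    split_ifs <;> simp <;> exact Nat.le_succ_of_le (ih _ _)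

-- starting from an empty block, _take_block consumes at least one line
theorem pvTakeBlock_nil_lt (lines : List String) (last : Option Int) (h : lines ≠ []) :
    (pvTakeBlock lines [] last).2.length < lines.length := by
  cases lines with
  | nil => exact absurd rfl h
  | cons line rest =>
    simp only [pvTakeBlock]
    by_cases h1 : pvRecordNameB line.toList = "TER".toList
    · rw [if_pos h1, if_neg (by simp)]
      exact Nat.lt_succ_of_le (pvTakeBlock_rest_le _ _ _)
    · rw [if_neg h1]
      by_cases h3 : pvRecordNameB line.toList = "ATOM".toList ∨
          pvRecordNameB line.toList = "HETATM".toList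
      · rw [if_pos h3, if_neg (by simp)]
        exact Nat.lt_succ_of_le (pvTakeBlock_rest_le _ _ _)
      · rw [if_neg h3]
        exact Nat.lt_succ_of_le (pvTakeBlock_rest_le _ _ _)

-- Source B's outer while loop: carve blocks off the front until no lines remain
def pvBlocksLoop (lines : List String) : List (List String) :=
  let p := pvTakeBlock lines [] none
  if p.1 = [] then [] else p.1 :: pvBlocksLoop p.2
termination_by lines.length
decreasing_by
  rename_i hp
  refine pvTakeBlock_nil_lt lines none (fun hnil => hp ?_)
  subst hnil
  rfl

def extract_ter_blocks_from_pdb_text_alt (pdb_text : String) : List (List String) :=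
  pvBlocksLoop (PySem.Str.splitlines pdb_text)

-- ===== PRECONDITION & SPEC =====
def Spec_extract_ter_blocks_from_pdb_text (pdb_text : String) (out : List (List String)) : Prop := out = extract_ter_blocks_from_pdb_text_alt pdb_text
instance (pdb_text : String) (out : List (List String)) : Decidable (Spec_extract_ter_blocks_from_pdb_text pdb_text out) := by unfold Spec_extract_ter_blocks_from_pdb_text; infer_instance

-- ===== CLAIM (what is proved, stated in full; the proofs are below) =====
def Claim_equal_extract_ter_blocks_from_pdb_text : Prop := ∀ (pdb_text : String), Dom_extract_ter_blocks_from_pdb_text pdb_text → Spec_extract_ter_blocks_from_pdb_text pdb_text (extract_ter_blocks_from_pdb_text pdb_text)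

-- ===== LEMMAS AND PROOFS =====

-- proof helper: pvBlocksLoop generalized to a mid-block state
def pvBlocksGo (lines : List String) (block : List String) (last : Option Int) : List (List String) :=
  let p := pvTakeBlock lines block last
  if p.1 = [] then [] else p.1 :: pvBlocksLoop p.2

theorem pvBlocksGo_nil_none (lines : List String) :
    pvBlocksGo lines [] none = pvBlocksLoop lines := by
  rw [pvBlocksLoop, pvBlocksGo]

-- congruence: pvBlocksGo only looks at pvTakeBlock's result
theorem pvBlocksGo_congr {l1 b1 : List String} {s1 : Option Int} {l2 b2 : List String}
    {s2 : Option Int} (h : pvTakeBlock l1 b1 s1 = pvTakeBlock l2 b2 s2) :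
    pvBlocksGo l1 b1 s1 = pvBlocksGo l2 b2 s2 := by
  simp only [pvBlocksGo, h]

set_option maxHeartbeats 1000000 in
-- MAIN invariant: running A's fold from any state produces b ++ (the blocks B carves from that state)
theorem pvMain (lines : List String) : ∀ (b : List (List String)) (cur : List String)
    (last : Option Int) (t : Bool),
    (if (lines.foldl pvStepA (b, cur, last, t)).2.1 ≠ [] then
        (lines.foldl pvStepA (b, cur, last, t)).1 ++ [(lines.foldl pvStepA (b, cur, last, t)).2.1]
      else (lines.foldl pvStepA (b, cur, last, t)).1) = b ++ pvBlocksGo lines cur last := by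
  induction lines with
  | nil =>
    intro b cur last t
    by_cases hc : cur = [] <;> simp [pvBlocksGo, pvTakeBlock, pvBlocksLoop, hc]
  | cons line rest ih =>
    intro b cur last t
    have hR : ∀ x, pvRecordNameB x = pvRecordName x := fun _ => rfl
    have hS : ∀ x, pvSafeIntB x = pvSafeInt x := fun _ => rfl
    have hRB : ∀ x, pvRstripCRLFB x = pvRstripCRLF x := fun _ => rfl
    by_cases hT : pvRecordName line.toList = "TER".toList
    · by_cases hc : cur = []
      · -- TER with empty current block: both sides just reset last to none
        have hstep : pvStepA (b, cur, last, t) line = (b, cur, none, true) := by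
          simp only [pvStepA]
          rw [if_pos hT]
          simp [hc]
        have htb : pvTakeBlock (line :: rest) cur last = pvTakeBlock rest cur none := by
          simp only [pvTakeBlock, hR]
          rw [if_pos hT]
          simp [hc]
        rw [List.foldl_cons, hstep, ih, pvBlocksGo_congr htb]
      · -- TER closing a nonempty block
        have hstep : pvStepA (b, cur, last, t) line = (b ++ [cur], [], none, true) := by
          simp only [pvStepA]
          rw [if_pos hT]
          simp [hc]
        have htb : pvTakeBlock (line :: rest) cur last = (cur, rest) := by
          simp only [pvTakeBlock, hR]
          rw [if_pos hT]
          simp [hc]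
        rw [List.foldl_cons, hstep, ih, pvBlocksGo_nil_none]
        rw [show pvBlocksGo (line :: rest) cur last = cur :: pvBlocksLoop rest from by
          rw [pvBlocksGo, htb]; simp [hc]]
        simp
    · by_cases hA : pvRecordName line.toList = "ATOM".toList ∨
          pvRecordName line.toList = "HETATM".toList
      · have hch : (pvParseMeta line.toList).chain_id = PySem.Chars.strip (PySem.List.slice (pvRstripCRLF line.toList) (some 21) (some 22)) := by
          simp only [pvParseMeta]
        have hrq : (pvParseMeta line.toList).resseq = pvSafeInt (PySem.List.slice (pvRstripCRLF line.toList) (some 22) (some 26)) := by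
          simp only [pvParseMeta]
        by_cases hbl : PySem.Chars.strip (PySem.List.slice (pvRstripCRLF line.toList) (some 21) (some 22)) = ([] : List Char)
        · cases last with
          | none =>
            have hau : pvAtomUpdate b cur none (PySem.Chars.strip (PySem.List.slice (pvRstripCRLF line.toList) (some 21) (some 22))) (pvSafeInt (PySem.List.slice (pvRstripCRLF line.toList) (some 22) (some 26))) = (b, cur, none) := by
              rw [pvAtomUpdate]; split_ifs <;> rfl
            have hstep : pvStepA (b, cur, none, t) line
                = (b, cur ++ [String.ofList (pvRstripCRLF line.toList)], some (pvSafeInt (PySem.List.slice (pvRstripCRLF line.toList) (some 22) (some 26))), t) := by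
              simp only [pvStepA]
              rw [if_neg hT, if_pos hA, hch, hrq, hau]
              simp [hbl]
            have htb : pvTakeBlock (line :: rest) cur none
                = pvTakeBlock rest (cur ++ [String.ofList (pvRstripCRLF line.toList)]) (some (pvSafeInt (PySem.List.slice (pvRstripCRLF line.toList) (some 22) (some 26)))) := by
              simp only [pvTakeBlock, hR, hS, hRB]
              rw [if_neg hT, if_pos hA]
              simp [hbl]
            rw [List.foldl_cons, hstep, ih, pvBlocksGo_congr htb]
          | some lv =>
            by_cases hc : cur = []
            · have hau : pvAtomUpdate b cur (some lv) (PySem.Chars.strip (PySem.List.slice (pvRstripCRLF line.toList) (some 21) (some 22))) (pvSafeInt (PySem.List.slice (pvRstripCRLF line.toList) (some 22) (some 26))) = (b, cur, some lv) := by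
                simp [pvAtomUpdate, hc]
              have hstep : pvStepA (b, cur, some lv, t) line
                  = (b, cur ++ [String.ofList (pvRstripCRLF line.toList)], some (pvSafeInt (PySem.List.slice (pvRstripCRLF line.toList) (some 22) (some 26))), t) := by
                simp only [pvStepA]
                rw [if_neg hT, if_pos hA, hch, hrq, hau]
                simp [hbl]
              have htb : pvTakeBlock (line :: rest) cur (some lv)
                  = pvTakeBlock rest (cur ++ [String.ofList (pvRstripCRLF line.toList)]) (some (pvSafeInt (PySem.List.slice (pvRstripCRLF line.toList) (some 22) (some 26)))) := by
                simp only [pvTakeBlock, hR, hS, hRB]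
                rw [if_neg hT, if_pos hA]
                simp [hbl, hc]
              rw [List.foldl_cons, hstep, ih, pvBlocksGo_congr htb]
            · by_cases hlt : pvSafeInt (PySem.List.slice (pvRstripCRLF line.toList) (some 22) (some 26)) < lv
              · -- forced split: A flushes then appends; B returns the block, line unconsumed
                have hau : pvAtomUpdate b cur (some lv) (PySem.Chars.strip (PySem.List.slice (pvRstripCRLF line.toList) (some 21) (some 22))) (pvSafeInt (PySem.List.slice (pvRstripCRLF line.toList) (some 22) (some 26))) = (b ++ [cur], [], none) := by
                  simp [pvAtomUpdate, hbl, hc, hlt]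
                have hstep : pvStepA (b, cur, some lv, t) line
                    = (b ++ [cur], [String.ofList (pvRstripCRLF line.toList)], some (pvSafeInt (PySem.List.slice (pvRstripCRLF line.toList) (some 22) (some 26))), t) := by
                  simp only [pvStepA]
                  rw [if_neg hT, if_pos hA, hch, hrq, hau]
                  simp [hbl]
                have htb1 : pvTakeBlock (line :: rest) cur (some lv) = (cur, line :: rest) := by
                  simp only [pvTakeBlock, hR, hS, hRB]
                  rw [if_neg hT, if_pos hA]
                  simp [hbl, hc, hlt]
                have htb2 : pvTakeBlock (line :: rest) [] none
                    = pvTakeBlock rest [String.ofList (pvRstripCRLF line.toList)] (some (pvSafeInt (PySem.List.slice (pvRstripCRLF line.toList) (some 22) (some 26)))) := by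
                  simp only [pvTakeBlock, hR, hS, hRB]
                  rw [if_neg hT, if_pos hA]
                  simp [hbl]
                rw [List.foldl_cons, hstep, ih]
                rw [show pvBlocksGo (line :: rest) cur (some lv) = cur :: pvBlocksLoop (line :: rest) from by
                  rw [pvBlocksGo, htb1]; simp [hc]]
                rw [← pvBlocksGo_nil_none (line :: rest), pvBlocksGo_congr htb2]
                simp
              · have hau : pvAtomUpdate b cur (some lv) (PySem.Chars.strip (PySem.List.slice (pvRstripCRLF line.toList) (some 21) (some 22))) (pvSafeInt (PySem.List.slice (pvRstripCRLF line.toList) (some 22) (some 26))) = (b, cur, some lv) := by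
                  simp [pvAtomUpdate, hbl, hc, hlt]
                have hstep : pvStepA (b, cur, some lv, t) line
                    = (b, cur ++ [String.ofList (pvRstripCRLF line.toList)], some (pvSafeInt (PySem.List.slice (pvRstripCRLF line.toList) (some 22) (some 26))), t) := by
                  simp only [pvStepA]
                  rw [if_neg hT, if_pos hA, hch, hrq, hau]
                  simp [hbl]
                have htb : pvTakeBlock (line :: rest) cur (some lv)
                    = pvTakeBlock rest (cur ++ [String.ofList (pvRstripCRLF line.toList)]) (some (pvSafeInt (PySem.List.slice (pvRstripCRLF line.toList) (some 22) (some 26)))) := by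
                  simp only [pvTakeBlock, hR, hS, hRB]
                  rw [if_neg hT, if_pos hA]
                  simp [hbl, hlt]
                rw [List.foldl_cons, hstep, ih, pvBlocksGo_congr htb]
        · -- chain id present: never a forced split, last unchanged
          have hau : pvAtomUpdate b cur last (PySem.Chars.strip (PySem.List.slice (pvRstripCRLF line.toList) (some 21) (some 22))) (pvSafeInt (PySem.List.slice (pvRstripCRLF line.toList) (some 22) (some 26))) = (b, cur, last) := by
            simp [pvAtomUpdate, hbl]
          have hstep : pvStepA (b, cur, last, t) line
              = (b, cur ++ [String.ofList (pvRstripCRLF line.toList)], last, t) := by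
            simp only [pvStepA]
            rw [if_neg hT, if_pos hA, hch, hrq, hau]
            simp [hbl]
          have htb : pvTakeBlock (line :: rest) cur last
              = pvTakeBlock rest (cur ++ [String.ofList (pvRstripCRLF line.toList)]) last := by
            simp only [pvTakeBlock, hR, hS, hRB]
            rw [if_neg hT, if_pos hA]
            simp [hbl]
          rw [List.foldl_cons, hstep, ih, pvBlocksGo_congr htb]
      · -- non-coordinate record: both sides skip the line
        have hstep : pvStepA (b, cur, last, t) line = (b, cur, last, t) := by
          simp only [pvStepA]
          rw [if_neg hT, if_neg hA]
        have htb : pvTakeBlock (line :: rest) cur last = pvTakeBlock rest cur last := by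
          simp only [pvTakeBlock, hR]
          rw [if_neg hT, if_neg hA]
        rw [List.foldl_cons, hstep, ih, pvBlocksGo_congr htb]

-- ===== VERDICT (by name: the statement is the Claim_ definition above) =====
theorem extract_ter_blocks_from_pdb_text_spec : Claim_equal_extract_ter_blocks_from_pdb_text := by
  intro s _
  unfold Spec_extract_ter_blocks_from_pdb_text
  unfold extract_ter_blocks_from_pdb_text extract_ter_blocks_from_pdb_text_alt
  have h := pvMain (PySem.Str.splitlines s) [] [] none false
  rw [pvBlocksGo_nil_none] at h
  simp only [List.nil_append] at h
  simp only [h]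
  split_ifs <;> simp_all
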